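-- pv_equiv track=rewrite | github.com/aks14075032/InterviewBit | Array/perfect-peak-of-array.py | perfectPeak
-- ===== SOURCE A (Python) =====
-- def perfectPeak(A):
--     n = len(A)
--     prefix = [0] * n
--     suffix = [0] * n
--     prefix[0] = A[0]
--     suffix[n - 1] = A[n - 1]
--     maxi = A[0]
--     mini = A[n - 1]
--     for i in range(1, n):
--         prefix[i] = maxi
--         maxi = max(maxi, A[i])
--     for i in range(n - 2, -1, -1):
--         suffix[i] = mini
--         mini = min(mini, A[i])
--
--     for i in range(1, n - 1):
--         if A[i] < suffix[i] and A[i] > prefix[i]: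
--             return 1
--     return 0
-- ===== SOURCE B (Python) =====
-- def perfectPeak(A):
--     # single left-to-right pass tracking one live candidate (O(1) extra space):
--     # a candidate is an element greater than everything before it; it is killed
--     # by any later element <= it; a surviving candidate also smaller than the
--     # last element is a perfect peak.
--     n = len(A)
--     leftmax = A[0]
--     cand = None
--     for i in range(1, n - 1):
--         x = A[i]
--         if cand is not None and x <= cand:
--             cand = None
--         if cand is None and x > leftmax:
--             cand = x
--         if x > leftmax:
--             leftmax = x
--     if cand is not None and A[n - 1] > cand:
--         return 1
--     return 0
-- ===== Notes on version B (the rewrite author's own statement) =====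
-- stated objective: alternative
-- what changed: B replaces A's prefix-max/suffix-min arrays and three passes by a single left-to-right greedy pass in O(1) extra space: it tracks one live candidate (an element greater than all earlier elements, killed by any later element <= it) and at the end reports 1 iff the surviving candidate is below the last element.
import Mathlib
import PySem

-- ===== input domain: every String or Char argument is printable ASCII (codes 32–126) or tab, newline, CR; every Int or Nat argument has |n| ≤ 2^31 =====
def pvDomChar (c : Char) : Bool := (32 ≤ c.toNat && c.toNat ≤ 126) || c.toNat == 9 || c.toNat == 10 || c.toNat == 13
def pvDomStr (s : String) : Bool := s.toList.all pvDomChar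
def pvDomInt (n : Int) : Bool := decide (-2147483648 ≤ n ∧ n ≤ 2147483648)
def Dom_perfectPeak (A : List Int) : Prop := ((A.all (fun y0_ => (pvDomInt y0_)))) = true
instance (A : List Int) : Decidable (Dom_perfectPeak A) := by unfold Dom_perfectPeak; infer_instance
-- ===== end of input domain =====

-- B replaces A's three array-building passes by a single greedy pass with O(1) extra
-- space that tracks one live candidate. Equivalence proved on Pre_ (nonempty lists);
-- on [] both Pythons raise IndexError.

-- ===== PORT A =====
-- loop body of A's first (prefix) loop: prefix[i] = maxi; maxi = max(maxi, A[i])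
def pvStepPre (A : List Int) (st : List Int × Int) (i : Int) : List Int × Int :=
  (st.1.set i.toNat st.2, max st.2 (PySem.List.pyGetD A i 0))

-- loop body of A's second (suffix) loop: suffix[i] = mini; mini = min(mini, A[i])
def pvStepSuf (A : List Int) (st : List Int × Int) (i : Int) : List Int × Int :=
  (st.1.set i.toNat st.2, min st.2 (PySem.List.pyGetD A i 0))

-- indices are in range throughout under Pre_, so pyGetD _ _ 0 is exact for A[...]
def perfectPeak (A : List Int) : Int :=
  let n := A.length
  let a0 := PySem.List.pyGetD A 0 0
  let an := PySem.List.pyGetD A ((n : Int) - 1) 0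
  let pre := (PySem.List.pyRange 1 (n : Int) 1).foldl (pvStepPre A)
               ((List.replicate n (0:Int)).set 0 a0, a0)
  let suf := (PySem.List.pyRange ((n : Int) - 2) (-1) (-1)).foldl (pvStepSuf A)
               ((List.replicate n (0:Int)).set (n - 1) an, an)
  if (PySem.List.pyRange 1 ((n : Int) - 1) 1).any (fun i =>
        decide (PySem.List.pyGetD A i 0 < PySem.List.pyGetD suf.1 i 0 ∧
                PySem.List.pyGetD A i 0 > PySem.List.pyGetD pre.1 i 0))
  then 1 else 0

-- ===== PORT B =====
-- B's loop: x = A[i]; kill cand if x <= cand; adopt x if no cand and x > leftmax;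
-- leftmax = x if x > leftmax; returns the candidate alive after the scan
def pvScan (A : List Int) (n : Nat) (leftmax : Int) (cand : Option Int) (i : Nat) : Option Int :=
  if i + 1 < n then
    let x := PySem.List.pyGetD A (i : Int) 0
    let cand1 : Option Int := match cand with
      | some c => if x ≤ c then none else some c
      | none => none
    let cand2 : Option Int := match cand1 with
      | none => if leftmax < x then some x else none
      | some c => some c
    pvScan A n (if leftmax < x then x else leftmax) cand2 (i + 1)
  else cand
termination_by n - i

def perfectPeak_alt (A : List Int) : Int :=
  let n := A.length
  match pvScan A n (PySem.List.pyGetD A 0 0) none 1 with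
  | none => 0
  | some c => if c < PySem.List.pyGetD A ((n : Int) - 1) 0 then 1 else 0

-- ===== PRECONDITION & SPEC =====
-- Python A raises IndexError on the empty list (A[0]); B raises there too.
def Pre_perfectPeak (A : List Int) : Prop := A ≠ []
instance (A : List Int) : Decidable (Pre_perfectPeak A) := by unfold Pre_perfectPeak; infer_instance
def pvWitness_perfectPeak : List Int := [1, 2, 3]

def Spec_perfectPeak (A : List Int) (out : Int) : Prop := out = perfectPeak_alt A
instance (A : List Int) (out : Int) : Decidable (Spec_perfectPeak A out) := by unfold Spec_perfectPeak; infer_instance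

-- ===== CLAIM (what is proved, stated in full; the proofs are below) =====
def Claim_equal_perfectPeak : Prop := ∀ (A : List Int), Dom_perfectPeak A → Pre_perfectPeak A → Spec_perfectPeak A (perfectPeak A)

-- ===== LEMMAS AND PROOFS =====

-- max of A[0..i-1] (seed A[0]) and min of A[j..n-1] (seed A[n-1])
def pvPmax (A : List Int) (i : Nat) : Int := (A.take i).foldl max (A.getD 0 0)
def pvSmin (A : List Int) (j : Nat) : Int := (A.drop j).foldl min (A.getD (A.length - 1) 0)

-- "some index j in [i, n-2] is a perfect peak"
def pvP (A : List Int) (i : Nat) : Prop :=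
  ∃ j, j < A.length ∧ i ≤ j ∧ j + 1 < A.length ∧
    pvPmax A j < A.getD j 0 ∧ A.getD j 0 < pvSmin A (j + 1)

-- B's candidate invariant: j is a live candidate at scan position i
def pvValid (A : List Int) (j i : Nat) : Prop :=
  1 ≤ j ∧ j < i ∧ pvPmax A j < A.getD j 0 ∧ ∀ k, j < k → k < i → A.getD j 0 < A.getD k 0

def pvInv (A : List Int) (i : Nat) (cand : Option Int) : Prop :=
  (cand = none ∧ ∀ j, ¬ pvValid A j i) ∨
  (∃ j, cand = some (A.getD j 0) ∧ pvValid A j i ∧ ∀ j', pvValid A j' i → j ≤ j')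

lemma pv_foldl_min_comm (l : List Int) : ∀ s a : Int, l.foldl min (min s a) = min (l.foldl min s) a := by
  induction l with
  | nil => intro s a; simp
  | cons x xs ih => intro s a; simp only [List.foldl_cons]; rw [min_right_comm, ih]

lemma pv_pmax_succ (A : List Int) (i : Nat) (h : i < A.length) :
    pvPmax A (i + 1) = max (pvPmax A i) (A.getD i 0) := by
  unfold pvPmax
  rw [List.take_add_one, List.getElem?_eq_getElem h]
  simp only [Option.toList_some, List.foldl_append, List.foldl_cons, List.foldl_nil]
  rw [List.getD_eq_getElem _ _ h]

lemma pv_smin_pred (A : List Int) (j : Nat) (h : j < A.length) :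
    pvSmin A j = min (pvSmin A (j + 1)) (A.getD j 0) := by
  unfold pvSmin
  rw [List.drop_eq_getElem_cons h]
  simp only [List.foldl_cons]
  rw [pv_foldl_min_comm, List.getD_eq_getElem _ _ h]

lemma pv_smin_len (A : List Int) : pvSmin A A.length = A.getD (A.length - 1) 0 := by
  unfold pvSmin; simp

lemma pv_smin_last (A : List Int) (hA : A ≠ []) :
    pvSmin A (A.length - 1) = A.getD (A.length - 1) 0 := by
  have hn : 1 ≤ A.length := List.length_pos_iff.mpr hA
  have h := pv_smin_pred A (A.length - 1) (by omega)
  rw [show A.length - 1 + 1 = A.length by omega, pv_smin_len] at h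
  rw [h, min_self]

lemma pv_pmax_one (A : List Int) (hA : A ≠ []) : pvPmax A 1 = A.getD 0 0 := by
  cases A with
  | nil => exact absurd rfl hA
  | cons a l => simp [pvPmax]

lemma pv_desc_range (n : Nat) (h : 1 ≤ n) :
    PySem.List.pyRange ((n : Int) - 2) (-1) (-1)
      = (List.range (n - 1)).map (fun k : Nat => ((n : Int) - 2) - (k : Int)) := by
  unfold PySem.List.pyRange
  rw [if_neg (by norm_num), if_neg (by norm_num)]
  rcases Nat.lt_or_ge n 2 with h2 | h2
  · have hn1 : n = 1 := by omega
    subst hn1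
    norm_num
  · rw [if_pos (by omega)]
    have hc : (((n : Int) - 2) - (-1) + -(-1) - 1) / -(-1) = (n : Int) - 1 := by
      norm_num; omega
    rw [hc, show ((n : Int) - 1).toNat = n - 1 by omega]
    apply List.map_congr_left
    intro k _
    ring

lemma pv_pref_char (A : List Int) (hA : A ≠ []) :
    ∀ c : Nat, c ≤ A.length - 1 →
    ((List.range c).map (fun k : Nat => (1 : Int) + (k : Int))).foldl (pvStepPre A)
        ((List.replicate A.length (0:Int)).set 0 (A.getD 0 0), A.getD 0 0)
      = ((List.range A.length).map
           (fun j => if j = 0 then A.getD 0 0 else if j ≤ c then pvPmax A j else 0),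
         pvPmax A (c + 1)) := by
  have hn : 1 ≤ A.length := List.length_pos_iff.mpr hA
  intro c hc
  induction c with
  | zero =>
      simp only [List.range_zero, List.map_nil, List.foldl_nil]
      rw [Prod.mk.injEq]
      refine ⟨?_, ?_⟩
      · apply List.ext_getElem
        · simp
        · intro j h1 h2
          simp only [List.getElem_set, List.getElem_replicate, List.getElem_map,
            List.getElem_range]
          simp only [List.length_set, List.length_replicate] at h1
          by_cases hj : j = 0
          · subst hj; simp
          · simp [hj, Ne.symm hj, show ¬ (j ≤ 0) by omega]
      · exact (pv_pmax_one A hA).symm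
  | succ c ih =>
      have hc' : c ≤ A.length - 1 := by omega
      rw [List.range_succ, List.map_append, List.foldl_append, ih hc']
      simp only [List.map_cons, List.map_nil, List.foldl_cons, List.foldl_nil, pvStepPre]
      have hcast : ((1 : Int) + (c : Int)).toNat = c + 1 := by omega
      have hget : PySem.List.pyGetD A ((1 : Int) + (c : Int)) 0 = A.getD (c + 1) 0 := by
        rw [show (1 : Int) + (c : Int) = ((c + 1 : Nat) : Int) by push_cast; ring,
          PySem.List.pyGetD_natCast]
      rw [Prod.mk.injEq]
      refine ⟨?_, ?_⟩
      · rw [hcast]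
        apply List.ext_getElem
        · simp
        · intro j h1 h2
          simp only [List.getElem_set, List.getElem_map, List.getElem_range]
          simp only [List.length_set, List.length_map, List.length_range] at h1
          by_cases hj : c + 1 = j
          · subst hj; simp
          · simp only [if_neg hj]
            by_cases hj0 : j = 0
            · simp [hj0]
            · simp only [if_neg hj0]
              by_cases hjc : j ≤ c
              · simp [hjc, show j ≤ c + 1 by omega]
              · simp [hjc, show ¬ (j ≤ c + 1) by omega]
      · rw [hget, pv_pmax_succ A (c+1) (by omega)]
lemma pv_suf_char (A : List Int) (hA : A ≠ []) :
    ∀ c : Nat, c ≤ A.length - 1 →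
    ((List.range c).map (fun k : Nat => ((A.length : Int) - 2) - (k : Int))).foldl (pvStepSuf A)
        ((List.replicate A.length (0:Int)).set (A.length - 1) (A.getD (A.length - 1) 0),
         A.getD (A.length - 1) 0)
      = ((List.range A.length).map
           (fun j => if A.length - 1 - c ≤ j then pvSmin A (j + 1) else 0),
         pvSmin A (A.length - 1 - c)) := by
  have hn : 1 ≤ A.length := List.length_pos_iff.mpr hA
  intro c hc
  induction c with
  | zero =>
      simp only [List.range_zero, List.map_nil, List.foldl_nil, Nat.sub_zero]
      rw [Prod.mk.injEq]
      refine ⟨?_, (pv_smin_last A hA).symm⟩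
      apply List.ext_getElem
      · simp
      · intro j h1 h2
        simp only [List.getElem_set, List.getElem_replicate, List.getElem_map,
          List.getElem_range]
        simp only [List.length_set, List.length_replicate] at h1
        by_cases hj : A.length - 1 = j
        · subst hj
          rw [if_pos rfl, if_pos (le_refl _)]
          rw [show A.length - 1 + 1 = A.length by omega, pv_smin_len]
        · rw [if_neg hj, if_neg (by omega)]
  | succ c ih =>
      have hc' : c ≤ A.length - 1 := by omega
      rw [List.range_succ, List.map_append, List.foldl_append, ih hc']
      simp only [List.map_cons, List.map_nil, List.foldl_cons, List.foldl_nil, pvStepSuf]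
      have hcast : (((A.length : Int) - 2) - (c : Int)).toNat = A.length - 2 - c := by omega
      have hget : PySem.List.pyGetD A (((A.length : Int) - 2) - (c : Int)) 0
          = A.getD (A.length - 2 - c) 0 := by
        rw [show ((A.length : Int) - 2) - (c : Int) = ((A.length - 2 - c : Nat) : Int) by omega,
          PySem.List.pyGetD_natCast]
      rw [Prod.mk.injEq]
      have hidx : A.length - 1 - c = A.length - 2 - c + 1 := by omega
      refine ⟨?_, ?_⟩
      · rw [hcast]
        apply List.ext_getElem
        · simp
        · intro j h1 h2
          simp only [List.getElem_set, List.getElem_map, List.getElem_range]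
          simp only [List.length_set, List.length_map, List.length_range] at h1
          by_cases hj : A.length - 2 - c = j
          · subst hj
            rw [if_pos rfl, if_pos (by omega), hidx]
          · rw [if_neg hj]
            by_cases hjc : A.length - 1 - c ≤ j
            · rw [if_pos hjc, if_pos (by omega)]
            · rw [if_neg hjc, if_neg (by omega)]
      · rw [hget, hidx, ← pv_smin_pred A (A.length - 2 - c) (by omega)]
        congr 1
        omega
lemma pv_A_form (A : List Int) (hA : A ≠ []) :
    perfectPeak A =
      if ((PySem.List.pyRange 1 ((A.length : Int) - 1) 1).any (fun i =>
        decide (PySem.List.pyGetD A i 0 <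
            PySem.List.pyGetD ((List.range A.length).map
              (fun j => if 0 ≤ j then pvSmin A (j + 1) else 0)) i 0 ∧
          PySem.List.pyGetD A i 0 >
            PySem.List.pyGetD ((List.range A.length).map
              (fun j => if j = 0 then A.getD 0 0 else if j ≤ A.length - 1 then pvPmax A j else 0)) i 0)))
      then 1 else 0 := by
  have hn : 1 ≤ A.length := List.length_pos_iff.mpr hA
  simp only [perfectPeak]
  rw [PySem.List.pyGetD_zero,
    show ((A.length : Int) - 1) = ((A.length - 1 : Nat) : Int) by omega,
    PySem.List.pyGetD_natCast,
    PySem.List.pyRange_one 1 (A.length : Int),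
    show ((A.length : Int) - 1).toNat = A.length - 1 by omega,
    pv_pref_char A hA (A.length - 1) le_rfl,
    pv_desc_range A.length hn,
    pv_suf_char A hA (A.length - 1) le_rfl]
  simp only [show A.length - 1 - (A.length - 1) = 0 from Nat.sub_self _]

lemma pv_A_elem (A : List Int) (i : Int) (h1 : 1 ≤ i) (h2 : i < (A.length : Int) - 1) :
    (decide (PySem.List.pyGetD A i 0 <
        PySem.List.pyGetD ((List.range A.length).map
          (fun j => if 0 ≤ j then pvSmin A (j + 1) else 0)) i 0 ∧
      PySem.List.pyGetD A i 0 >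
        PySem.List.pyGetD ((List.range A.length).map
          (fun j => if j = 0 then A.getD 0 0 else if j ≤ A.length - 1 then pvPmax A j else 0)) i 0))
    = decide (pvPmax A i.toNat < A.getD i.toNat 0 ∧ A.getD i.toNat 0 < pvSmin A (i.toNat + 1)) := by
  have hij : i = ((i.toNat : Nat) : Int) := by omega
  have hj1 : 1 ≤ i.toNat := by omega
  have hjn : i.toNat < A.length - 1 := by omega
  rw [hij, PySem.List.pyGetD_natCast, PySem.List.pyGetD_natCast, PySem.List.pyGetD_natCast,
    PySem.List.getD_map_range _ _ _ _ (by omega), PySem.List.getD_map_range _ _ _ _ (by omega)]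
  rw [if_pos (Nat.zero_le _), if_neg (by omega), if_pos (by omega)]
  apply decide_eq_decide.mpr
  constructor <;> rintro ⟨a, b⟩ <;> exact ⟨b, a⟩

lemma pv_A_char1 (A : List Int) (hA : A ≠ []) (hp : pvP A 1) : perfectPeak A = 1 := by
  rw [pv_A_form A hA, if_pos]
  obtain ⟨j, hj1, hj2, hj3, hc1, hc2⟩ := hp
  rw [List.any_eq_true]
  refine ⟨(j : Int), PySem.List.mem_pyRange_one.mpr ⟨by omega, by omega⟩, ?_⟩
  rw [pv_A_elem A (j : Int) (by omega) (by omega)]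
  simp only [Int.toNat_natCast]
  exact decide_eq_true ⟨hc1, hc2⟩

lemma pv_A_char0 (A : List Int) (hA : A ≠ []) (hp : ¬ pvP A 1) : perfectPeak A = 0 := by
  rw [pv_A_form A hA, if_neg]
  intro hany
  rw [List.any_eq_true] at hany
  obtain ⟨i, hmem, hdec⟩ := hany
  obtain ⟨hb1, hb2⟩ := PySem.List.mem_pyRange_one.mp hmem
  rw [pv_A_elem A i hb1 hb2] at hdec
  have hc := of_decide_eq_true hdec
  exact hp ⟨i.toNat, by omega, by omega, by omega, hc⟩

-- ---- B-side lemmas ----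

lemma pv_pmax_mono (A : List Int) : ∀ i i' : Nat, i ≤ i' → i' ≤ A.length →
    pvPmax A i ≤ pvPmax A i' := by
  intro i i' h hle
  induction i' with
  | zero => obtain rfl := Nat.le_zero.mp h; exact le_refl _
  | succ m ih =>
      rcases Nat.lt_or_ge i (m + 1) with hlt | hge
      · rw [pv_pmax_succ A m (by omega)]
        exact le_trans (ih (by omega) (by omega)) (le_max_left _ _)
      · obtain rfl : i = m + 1 := by omega
        exact le_refl _

lemma pv_le_pmax (A : List Int) (j i : Nat) (hj : j < i) (hi : i ≤ A.length) :
    A.getD j 0 ≤ pvPmax A i := by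
  have h1 : A.getD j 0 ≤ pvPmax A (j + 1) := by
    rw [pv_pmax_succ A j (by omega)]; exact le_max_right _ _
  exact le_trans h1 (pv_pmax_mono A (j + 1) i (by omega) hi)

lemma pv_valid_succ (A : List Int) (j i : Nat) :
    pvValid A j (i + 1) ↔
      (pvValid A j i ∧ A.getD j 0 < A.getD i 0) ∨
      (j = i ∧ 1 ≤ i ∧ pvPmax A i < A.getD i 0) := by
  constructor
  · rintro ⟨h1, h2, h3, h4⟩
    rcases Nat.lt_or_ge j i with hlt | hge
    · exact Or.inl ⟨⟨h1, hlt, h3, fun k hk1 hk2 => h4 k hk1 (by omega)⟩, h4 i hlt (by omega)⟩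
    · obtain rfl : j = i := by omega
      exact Or.inr ⟨rfl, h1, h3⟩
  · rintro (⟨⟨h1, h2, h3, h4⟩, h5⟩ | ⟨rfl, h1, h3⟩)
    · refine ⟨h1, by omega, h3, fun k hk1 hk2 => ?_⟩
      rcases Nat.lt_or_ge k i with hki | hki
      · exact h4 k hk1 hki
      · obtain rfl : k = i := by omega
        exact h5
    · exact ⟨h1, by omega, h3, fun k hk1 hk2 => by omega⟩

-- minimal-index live candidate also has the minimal value
lemma pv_valid_min_val (A : List Int) (i jm j' : Nat) (hm : pvValid A jm i)
    (h' : pvValid A j' i) (hle : jm ≤ j') (hne : jm ≠ j') :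
    A.getD jm 0 < A.getD j' 0 :=
  hm.2.2.2 j' (by omega) h'.2.1

lemma pv_inv_step (A : List Int) (i : Nat) (hi : 1 ≤ i) (hin : i + 1 < A.length)
    (cand : Option Int) (h : pvInv A i cand) :
    pvInv A (i + 1)
      (match (match cand with
              | some c => if A.getD i 0 ≤ c then none else some c
              | none => none) with
       | none => if pvPmax A i < A.getD i 0 then some (A.getD i 0) else none
       | some c => some c) := by
  rcases h with ⟨rfl, hnone⟩ | ⟨jm, rfl, hvm, hmin⟩
  · -- no live candidate
    simp only
    by_cases hx : pvPmax A i < A.getD i 0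
    · rw [if_pos hx]
      refine Or.inr ⟨i, rfl, ?_, ?_⟩
      · exact (pv_valid_succ A i i).mpr (Or.inr ⟨rfl, hi, hx⟩)
      · intro j' hj'
        rcases (pv_valid_succ A j' i).mp hj' with ⟨hv, _⟩ | ⟨rfl, _, _⟩
        · exact absurd hv (hnone j')
        · exact le_refl _
    · rw [if_neg hx]
      refine Or.inl ⟨rfl, fun j hj => ?_⟩
      rcases (pv_valid_succ A j i).mp hj with ⟨hv, _⟩ | ⟨rfl, _, hx'⟩
      · exact hnone j hv
      · exact hx hx'
  · -- live candidate A[jm]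
    have hcle : A.getD jm 0 ≤ pvPmax A i := pv_le_pmax A jm i hvm.2.1 (by omega)
    by_cases hkill : A.getD i 0 ≤ A.getD jm 0
    · -- killed; new element cannot become a candidate either
      simp only [if_pos hkill]
      rw [if_neg (by omega)]
      refine Or.inl ⟨rfl, fun j hj => ?_⟩
      rcases (pv_valid_succ A j i).mp hj with ⟨hv, hlt⟩ | ⟨rfl, _, hx'⟩
      · have hjmle := hmin j hv
        rcases Nat.eq_or_lt_of_le hjmle with rfl | hltm
        · omega
        · have := pv_valid_min_val A i jm j hvm hv (by omega) (by omega)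
          omega
      · omega
    · -- survives
      simp only [if_neg hkill]
      refine Or.inr ⟨jm, rfl, ?_, ?_⟩
      · exact (pv_valid_succ A jm i).mpr (Or.inl ⟨hvm, by omega⟩)
      · intro j' hj'
        rcases (pv_valid_succ A j' i).mp hj' with ⟨hv, _⟩ | ⟨rfl, _, _⟩
        · exact hmin j' hv
        · exact Nat.le_of_lt hvm.2.1

lemma pv_scan_inv (A : List Int) : ∀ (d i : Nat) (cand : Option Int),
    A.length - i ≤ d → 1 ≤ i → pvInv A i cand →
    pvInv A (max i (A.length - 1)) (pvScan A A.length (pvPmax A i) cand i) := by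
  intro d
  induction d with
  | zero =>
      intro i cand hd hi hinv
      rw [pvScan, if_neg (by omega)]
      rwa [show max i (A.length - 1) = i by omega]
  | succ d ih =>
      intro i cand hd hi hinv
      by_cases hni : i + 1 < A.length
      · rw [pvScan, if_pos hni]
        simp only [PySem.List.pyGetD_natCast]
        have hstep := pv_inv_step A i hi hni cand hinv
        have hmax : (if pvPmax A i < A.getD i 0 then A.getD i 0 else pvPmax A i)
            = pvPmax A (i + 1) := by
          rw [pv_pmax_succ A i (by omega)]
          rcases le_or_gt (A.getD i 0) (pvPmax A i) with h | h
          · rw [if_neg (by omega), max_eq_left h]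
          · rw [if_pos h, max_eq_right (le_of_lt h)]
        rw [hmax]
        have := ih (i + 1) _ (by omega) (by omega) hstep
        rwa [show max (i + 1) (A.length - 1) = max i (A.length - 1) by omega] at this
      · rw [pvScan, if_neg hni]
        rwa [show max i (A.length - 1) = i by omega]

lemma pv_smin_gt (A : List Int) (hA : A ≠ []) : ∀ (d m : Nat), A.length - 1 - m ≤ d →
    m ≤ A.length - 1 → ∀ v : Int,
    (v < pvSmin A m ↔ ∀ k, m ≤ k → k < A.length → v < A.getD k 0) := by
  have hn : 1 ≤ A.length := List.length_pos_iff.mpr hA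
  intro d
  induction d with
  | zero =>
      intro m hd hm v
      obtain rfl : m = A.length - 1 := by omega
      rw [pv_smin_last A hA]
      constructor
      · intro h k hk1 hk2
        obtain rfl : k = A.length - 1 := by omega
        exact h
      · intro h; exact h (A.length - 1) le_rfl (by omega)
  | succ d ih =>
      intro m hd hm v
      rcases Nat.eq_or_lt_of_le hm with rfl | hlt
      · exact ih (A.length - 1) (by omega) le_rfl v
      · rw [pv_smin_pred A m (by omega), lt_min_iff, ih (m + 1) (by omega) (by omega) v]
        constructor
        · rintro ⟨h1, h2⟩ k hk1 hk2
          rcases Nat.eq_or_lt_of_le hk1 with rfl | hk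
          · exact h2
          · exact h1 k (by omega) hk2
        · intro h
          exact ⟨fun k hk1 hk2 => h k (by omega) hk2, h m le_rfl (by omega)⟩

lemma pv_P_iff (A : List Int) (hA : A ≠ []) :
    pvP A 1 ↔ ∃ j, pvValid A j (A.length - 1) ∧ A.getD j 0 < A.getD (A.length - 1) 0 := by
  have hn : 1 ≤ A.length := List.length_pos_iff.mpr hA
  constructor
  · rintro ⟨j, hj1, hj2, hj3, hc1, hc2⟩
    have hs := (pv_smin_gt A hA (A.length) (j + 1) (by omega) (by omega) (A.getD j 0)).mp hc2
    refine ⟨j, ⟨hj2, by omega, hc1, fun k hk1 hk2 => hs k (by omega) (by omega)⟩,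
      hs (A.length - 1) (by omega) (by omega)⟩
  · rintro ⟨j, ⟨h1, h2, h3, h4⟩, h5⟩
    refine ⟨j, by omega, h1, by omega, h3, ?_⟩
    rw [pv_smin_gt A hA (A.length) (j + 1) (by omega) (by omega)]
    intro k hk1 hk2
    rcases Nat.lt_or_ge k (A.length - 1) with hk | hk
    · exact h4 k (by omega) hk
    · obtain rfl : k = A.length - 1 := by omega
      exact h5

lemma pv_B_char (A : List Int) (hA : A ≠ []) :
    (pvP A 1 → perfectPeak_alt A = 1) ∧ (¬ pvP A 1 → perfectPeak_alt A = 0) := by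
  have hn : 1 ≤ A.length := List.length_pos_iff.mpr hA
  have hinv0 : pvInv A 1 none := Or.inl ⟨rfl, fun j hj => by obtain ⟨a, b, _⟩ := hj; omega⟩
  have hres := pv_scan_inv A (A.length) 1 none (by omega) le_rfl hinv0
  simp only [perfectPeak_alt]
  rw [PySem.List.pyGetD_zero, ← pv_pmax_one A hA,
    show ((A.length : Int) - 1) = ((A.length - 1 : Nat) : Int) by omega,
    PySem.List.pyGetD_natCast]
  -- the invariant index after the scan: for n ≤ 2 it is 1, where pvValid is also empty
  have hconv : ∀ j, pvValid A j (max 1 (A.length - 1)) ↔ pvValid A j (A.length - 1) := by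
    intro j
    rcases Nat.lt_or_ge A.length 3 with h3 | h3
    · constructor <;> (rintro ⟨a, b, _⟩; omega)
    · rw [show max 1 (A.length - 1) = A.length - 1 by omega]
  rcases hres with ⟨heq, hnone⟩ | ⟨jm, heq, hvm, hmin⟩
  · rw [heq]
    refine ⟨fun hp => ?_, fun _ => rfl⟩
    obtain ⟨j, hv, _⟩ := (pv_P_iff A hA).mp hp
    exact absurd ((hconv j).mpr hv) (hnone j)
  · rw [heq]
    have hvm' := (hconv jm).mp hvm
    constructor
    · intro hp
      by_cases hlt : A.getD jm 0 < A.getD (A.length - 1) 0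
      · exact if_pos hlt
      · exfalso
        obtain ⟨j, hv, hj5⟩ := (pv_P_iff A hA).mp hp
        have hv' := (hconv j).mpr hv
        have hjmle := hmin j hv'
        rcases Nat.eq_or_lt_of_le hjmle with rfl | hltm
        · exact hlt hj5
        · have := pv_valid_min_val A (max 1 (A.length - 1)) jm j hvm hv' (by omega) (by omega)
          omega
    · intro hnp
      exact if_neg (fun hlt => hnp ((pv_P_iff A hA).mpr ⟨jm, hvm', hlt⟩))

-- ===== VERDICT (by name: the statement is the Claim_ definition above) =====
theorem perfectPeak_spec : Claim_equal_perfectPeak := by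
  intro A _ hPre
  unfold Spec_perfectPeak
  by_cases hp : pvP A 1
  · rw [pv_A_char1 A hPre hp, (pv_B_char A hPre).1 hp]
  · rw [pv_A_char0 A hPre hp, (pv_B_char A hPre).2 hp]
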